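-- pv_equiv track=rewrite | github.com/ferhatelmas/algo | topCoder/srms/300s/srm395/div2/square_digit_number.py | getNumber
-- ===== SOURCE A (Python) =====
-- from itertools import product
--
-- def getNumber(n):
--     i = 1
--     while True:
--         for e in product('0149', repeat=i):
--             if i > 1 and e[0] == '0':
--                 continue
--             n -= 1
--             if n == -1:
--                 return int(''.join(e))
--         i += 1
--     return 0
-- ===== SOURCE B (Python) =====
-- def getNumber(n):
--     s = '0149'
--     if n < 4:
--         return int(s[n])
--     m = n - 4
--     i = 2
--     while m >= 3 * 4 ** (i - 1):
--         m -= 3 * 4 ** (i - 1)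
--         i += 1
--     q, r = divmod(m, 4 ** (i - 1))
--     out = '149'[q]
--     for k in range(i - 2, -1, -1):
--         out += s[(r // 4 ** k) % 4]
--     return int(out)
-- ===== Notes on version B (the rewrite author's own statement) =====
-- stated objective: faster
-- what changed: A enumerates all digit-{0,1,4,9} strings one by one until the n-th; B computes the n-th directly: it finds the digit length by subtracting block counts 4, 3*4^(i-1), then reads the digits positionally base-4 and converts once.
import Mathlib
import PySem

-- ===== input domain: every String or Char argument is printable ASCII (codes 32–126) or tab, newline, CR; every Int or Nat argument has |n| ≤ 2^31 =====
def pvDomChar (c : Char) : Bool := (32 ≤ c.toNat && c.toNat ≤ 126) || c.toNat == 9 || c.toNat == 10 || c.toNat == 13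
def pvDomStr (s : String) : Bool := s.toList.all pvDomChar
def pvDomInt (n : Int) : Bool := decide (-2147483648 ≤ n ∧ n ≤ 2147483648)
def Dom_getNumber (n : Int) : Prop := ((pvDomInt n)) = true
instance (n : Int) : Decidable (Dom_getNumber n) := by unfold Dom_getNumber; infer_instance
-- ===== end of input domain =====

-- B replaces A's one-by-one enumeration of digit-{0,1,4,9} strings by direct positional
-- (base-4-style) construction of the n-th such string; equivalence of return values is proved on n ≥ 0.

-- ===== PORT A =====
-- itertools.product('0149', repeat=i), leftmost position varies slowest
def pvProdA : Nat → List (List Char)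
  | 0 => [[]]
  | i + 1 => ['0', '1', '4', '9'].flatMap (fun c => (pvProdA i).map (fun e => c :: e))

-- the body of A's `for e in product(...)` loop: either returns (inl) or passes the updated n on (inr)
def pvInnerA (i : Nat) (n : Int) : List (List Char) → Sum Int Int
  | [] => .inr n
  | e :: rest =>
    if 1 < i ∧ PySem.List.pyGet? e 0 = some '0' then pvInnerA i n rest
    else
      let n' := n - 1
      if n' = -1 then .inl ((PySem.Int.ofStr? (String.ofList e)).getD 0)
      else pvInnerA i n' rest

-- A's `while True` loop; the fuel only makes it total (A diverges for n < 0, excluded by Pre_);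
-- the fuel-exhausted value 0 is A's unreachable trailing `return 0`
def pvOuterA : Nat → Nat → Int → Int
  | 0, _, _ => 0
  | fuel + 1, i, n =>
    match pvInnerA i n (pvProdA i) with
    | .inl r => r
    | .inr n' => pvOuterA fuel (i + 1) n'

def getNumber (n : Int) : Int := pvOuterA (n.toNat + 1) 1 n

-- ===== PORT B =====
-- B's `while m >= 3 * 4 ** (i - 1)` loop (fuel only for totality; m shrinks each pass)
def pvWloopB : Nat → Int → Nat → Int × Nat
  | 0, m, i => (m, i)
  | fuel + 1, m, i =>
    if 3 * 4 ^ (i - 1) ≤ m then pvWloopB fuel (m - 3 * 4 ^ (i - 1)) (i + 1) else (m, i)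

def getNumber_alt (n : Int) : Int :=
  let s : List Char := ['0', '1', '4', '9']
  if n < 4 then (PySem.Int.ofChars? [(PySem.List.pyGet? s n).getD ' ']).getD 0
  else
    let mi := pvWloopB ((n - 4).toNat + 1) (n - 4) 2
    let m := mi.1
    let i := mi.2
    let q := PySem.Int.floordiv m (4 ^ (i - 1))
    let r := PySem.Int.mod m (4 ^ (i - 1))
    let out0 : List Char := [(PySem.List.pyGet? ['1', '4', '9'] q).getD ' ']
    let out := (PySem.List.pyRange ((i : Int) - 2) (-1) (-1)).foldl
      (fun out k =>
        out ++ [(PySem.List.pyGet? s (PySem.Int.mod (PySem.Int.floordiv r ((4 : Int) ^ k.toNat)) 4)).getD ' ']) out0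
    (PySem.Int.ofChars? out).getD 0

-- ===== PRECONDITION & SPEC =====
-- Pre_ excludes exactly the negative n, on which A's while-loop never terminates (A returns no value there).
def Pre_getNumber (n : Int) : Prop := 0 ≤ n
instance (n : Int) : Decidable (Pre_getNumber n) := by unfold Pre_getNumber; infer_instance
def pvWitness_getNumber : Int := 7

def Spec_getNumber (n : Int) (out : Int) : Prop := out = getNumber_alt n
instance (n : Int) (out : Int) : Decidable (Spec_getNumber n out) := by unfold Spec_getNumber; infer_instance

-- ===== CLAIM (what is proved, stated in full; the proofs are below) =====
def Claim_equal_getNumber : Prop := ∀ (n : Int), Dom_getNumber n → Pre_getNumber n → Spec_getNumber n (getNumber n)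

-- ===== LEMMAS AND PROOFS =====

-- positional description: pvDig4 i j = the length-i digit string of j written base 4 over '0149'
def pvS4 (d : Nat) : Char := (['0', '1', '4', '9']).getD d ' '

def pvDig4 : Nat → Nat → List Char
  | 0, _ => []
  | i + 1, j => pvS4 (j / 4 ^ i % 4) :: pvDig4 i j

-- A's filter condition and return value, named for the proofs
def pvKeep (i : Nat) (e : List Char) : Bool := !decide (1 < i ∧ PySem.List.pyGet? e 0 = some '0')
def pvF (e : List Char) : Int := (PySem.Int.ofStr? (String.ofList e)).getD 0

-- the tail of getNumber_alt after the while-loop, as a function of the loop's result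
def pvTailB (mi : Int × Nat) : Int :=
  let s : List Char := ['0', '1', '4', '9']
  let m := mi.1
  let i := mi.2
  let q := PySem.Int.floordiv m (4 ^ (i - 1))
  let r := PySem.Int.mod m (4 ^ (i - 1))
  let out0 : List Char := [(PySem.List.pyGet? ['1', '4', '9'] q).getD ' ']
  let out := (PySem.List.pyRange ((i : Int) - 2) (-1) (-1)).foldl
    (fun out k =>
      out ++ [(PySem.List.pyGet? s (PySem.Int.mod (PySem.Int.floordiv r ((4 : Int) ^ k.toNat)) 4)).getD ' ']) out0
  (PySem.Int.ofChars? out).getD 0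

theorem pvAlt_eq (n : Int) (h : ¬ n < 4) :
    getNumber_alt n = pvTailB (pvWloopB ((n - 4).toNat + 1) (n - 4) 2) := by
  unfold getNumber_alt pvTailB
  rw [if_neg h]

theorem pvDig4_mod (i m j : Nat) (him : i ≤ m) : pvDig4 i (j % 4 ^ m) = pvDig4 i j := by
  induction i generalizing j with
  | zero => rfl
  | succ i ih =>
    have hm : 4 ^ m = 4 ^ i * 4 ^ (m - i) := by
      rw [← pow_add]; congr 1; omega
    have h1 : j % 4 ^ m / 4 ^ i % 4 = j / 4 ^ i % 4 := by
      rw [hm, Nat.mod_mul_right_div_self]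
      exact Nat.mod_mod_of_dvd _ (dvd_pow_self 4 (by omega))
    simp only [pvDig4, h1, ih j (by omega)]

theorem pvBlocks_get (cs : List Char) (P : List (List Char)) (L : Nat) (hL : 0 < L)
    (hP : P.length = L) (j : Nat) (hj : j < cs.length * L) :
    (cs.flatMap (fun c => P.map (fun e => c :: e)))[j]? =
      Option.map (fun e => cs.getD (j / L) ' ' :: e) P[j % L]? := by
  induction cs generalizing j with
  | nil => simp at hj
  | cons c cs ih =>
    simp only [List.flatMap_cons]
    by_cases h : j < L
    · rw [List.getElem?_append, if_pos (by simp [hP, h]), List.getElem?_map]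
      rw [Nat.div_eq_of_lt h, Nat.mod_eq_of_lt h]
      rfl
    · rw [List.getElem?_append_right (by simp [hP]; omega)]
      have hlen : (P.map (fun e => c :: e)).length = L := by simp [hP]
      have hj2 : j - L < cs.length * L := by
        have : (cs.length + 1) * L = cs.length * L + L := by ring
        simp only [List.length_cons] at hj; omega
      rw [hlen, ih (j - L) hj2]
      have hj' : j = (j - L) + L := by omega
      have h1 : (j - L) / L + 1 = j / L := by
        conv_rhs => rw [hj']
        rw [Nat.add_div_right _ hL]
      have h2 : (j - L) % L = j % L := by
        conv_rhs => rw [hj']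
        rw [Nat.add_mod_right]
      rw [h2, ← h1]
      rfl

theorem pvProdA_length (i : Nat) : (pvProdA i).length = 4 ^ i := by
  induction i with
  | zero => rfl
  | succ i ih => simp [pvProdA, ih, pow_succ]; ring

theorem pvProdA_get (i j : Nat) (hj : j < 4 ^ i) : (pvProdA i)[j]? = some (pvDig4 i j) := by
  induction i generalizing j with
  | zero =>
    interval_cases j
    rfl
  | succ i ih =>
    have hL : 0 < 4 ^ i := Nat.pow_pos (by norm_num)
    have hj' : j < (['0','1','4','9'] : List Char).length * 4 ^ i := by
      simp only [List.length_cons, List.length_nil]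
      rw [pow_succ] at hj; omega
    rw [show pvProdA (i+1) = ['0','1','4','9'].flatMap (fun c => (pvProdA i).map (fun e => c :: e)) from rfl]
    rw [pvBlocks_get _ _ _ hL (pvProdA_length i) j hj']
    rw [ih (j % 4 ^ i) (Nat.mod_lt _ hL)]
    have hq : j / 4 ^ i < 4 := by
      rw [Nat.div_lt_iff_lt_mul hL]; rw [pow_succ] at hj; omega
    simp only [Option.map_some]
    rw [pvDig4_mod i i j le_rfl]
    have : pvS4 (j / 4 ^ i % 4) = (['0','1','4','9'] : List Char).getD (j / 4 ^ i) ' ' := by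
      rw [Nat.mod_eq_of_lt hq]; rfl
    rw [pvDig4]
    rw [this]

theorem pvInnerA_eq (i : Nat) (l : List (List Char)) (n : Int) (hn : 0 ≤ n) :
    pvInnerA i n l =
      if n < ((l.filter (pvKeep i)).length : Int)
      then .inl (pvF ((l.filter (pvKeep i)).getD n.toNat []))
      else .inr (n - (l.filter (pvKeep i)).length) := by
  induction l generalizing n with
  | nil => simp [pvInnerA]; omega
  | cons e rest ih =>
    by_cases hc : 1 < i ∧ PySem.List.pyGet? e 0 = some '0'
    · have hk : pvKeep i e = false := by simp [pvKeep, hc]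
      rw [show pvInnerA i n (e :: rest) = pvInnerA i n rest from by simp [pvInnerA, hc]]
      rw [List.filter_cons_of_neg (by simp [hk])]
      exact ih n hn
    · have hk : pvKeep i e = true := by unfold pvKeep; rw [decide_eq_false hc]; rfl
      rw [List.filter_cons_of_pos hk]
      by_cases h0 : n = 0
      · subst h0
        rw [show pvInnerA i 0 (e :: rest) = .inl (pvF e) from by
          simp [pvInnerA, hc, pvF, PySem.Int.ofStr?_ofList]]
        simp [pvF]
      · have h1 : ¬ (n - 1 = -1) := by omega
        rw [show pvInnerA i n (e :: rest) = pvInnerA i (n - 1) rest from by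
          simp only [pvInnerA]; rw [if_neg hc, if_neg h1]]
        rw [ih (n - 1) (by omega)]
        have hnt : n.toNat = (n - 1).toNat + 1 := by omega
        by_cases h2 : n - 1 < ((rest.filter (pvKeep i)).length : Int)
        · rw [if_pos h2, if_pos (by simp; omega)]
          rw [hnt]
          rfl
        · rw [if_neg h2, if_neg (by simp at h2 ⊢; omega)]
          congr 1
          simp
          omega

theorem pvKept_one : (pvProdA 1).filter (pvKeep 1) = [['0'], ['1'], ['4'], ['9']] := by decide

theorem pvKept_big (i : Nat) (hi : 2 ≤ i) :
    (pvProdA i).filter (pvKeep i) =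
      ['1', '4', '9'].flatMap (fun c => (pvProdA (i - 1)).map (fun e => c :: e)) := by
  obtain ⟨t, rfl⟩ : ∃ t, i = t + 1 := ⟨i - 1, by omega⟩
  have hkeep : ∀ (c : Char) (e : List Char), c ≠ '0' → pvKeep (t + 1) (c :: e) = true := by
    intro c e hc
    unfold pvKeep
    rw [decide_eq_false (fun h => hc (by
      have h2 := h.2
      rwa [PySem.List.pyGet?_zero_cons, Option.some_inj] at h2))]
    rfl
  have hdrop : ∀ (e : List Char), pvKeep (t + 1) ('0' :: e) = false := by
    intro e
    unfold pvKeep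
    rw [decide_eq_true (by exact ⟨by omega, by simp⟩)]
    rfl
  show ((['0','1','4','9'] : List Char).flatMap fun c => (pvProdA t).map (fun e => c :: e)).filter (pvKeep (t+1)) = _
  simp only [List.flatMap_cons, List.flatMap_nil, List.append_nil, List.filter_append]
  rw [List.filter_map, List.filter_map, List.filter_map, List.filter_map]
  have h0 : (pvProdA t).filter (pvKeep (t+1) ∘ fun e => '0' :: e) = [] := by
    apply List.filter_eq_nil_iff.2
    intro e _
    simp [Function.comp, hdrop e]
  have hsame : ∀ c : Char, c ≠ '0' →
      (pvProdA t).filter (pvKeep (t+1) ∘ fun e => c :: e) = pvProdA t := by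
    intro c hc
    apply List.filter_eq_self.2
    intro e _
    simp [Function.comp, hkeep c e hc]
  rw [h0, hsame '1' (by decide), hsame '4' (by decide), hsame '9' (by decide)]
  simp

theorem pvKept_big_length (i : Nat) (hi : 2 ≤ i) :
    ((pvProdA i).filter (pvKeep i)).length = 3 * 4 ^ (i - 1) := by
  rw [pvKept_big i hi]
  simp [pvProdA_length]
  ring

theorem pvFd (a : Int) (b : Nat) (ha : 0 ≤ a) :
    PySem.Int.floordiv a ((b : Nat) : Int) = ((a.toNat / b : Nat) : Int) := by
  unfold PySem.Int.floordiv
  obtain ⟨m, rfl⟩ : ∃ m : Nat, a = (m : Int) := ⟨a.toNat, by omega⟩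
  rw [Int.toNat_natCast]
  exact Eq.symm (Int.ofNat_fdiv m b)

theorem pvMd (a : Int) (b : Nat) (ha : 0 ≤ a) :
    PySem.Int.mod a ((b : Nat) : Int) = ((a.toNat % b : Nat) : Int) := by
  unfold PySem.Int.mod
  obtain ⟨m, rfl⟩ : ∃ m : Nat, a = (m : Int) := ⟨a.toNat, by omega⟩
  rw [Int.toNat_natCast]
  exact Eq.symm (Int.ofNat_fmod m b)

theorem pvFoldB (j : Nat) (rn : Nat) (acc : List Char) :
    (PySem.List.pyRange ((j : Int) - 1) (-1) (-1)).foldl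
      (fun out k =>
        out ++ [(PySem.List.pyGet? (['0', '1', '4', '9'] : List Char)
          (PySem.Int.mod (PySem.Int.floordiv ((rn : Nat) : Int) ((4 : Int) ^ k.toNat)) 4)).getD ' ']) acc
    = acc ++ pvDig4 j rn := by
  induction j generalizing acc with
  | zero =>
    rw [PySem.List.pyRange_neg_one_eq_nil (by norm_num)]
    simp [pvDig4]
  | succ j ih =>
    rw [show ((j + 1 : Nat) : Int) - 1 = (j : Int) from by push_cast; ring]
    rw [PySem.List.pyRange_neg_one_cons (by omega)]
    rw [List.foldl_cons]
    have hhead : (PySem.List.pyGet? (['0', '1', '4', '9'] : List Char)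
        (PySem.Int.mod (PySem.Int.floordiv ((rn : Nat) : Int) ((4 : Int) ^ ((j : Int)).toNat)) 4)).getD ' '
        = pvS4 (rn / 4 ^ j % 4) := by
      rw [show ((j : Int)).toNat = j from by omega]
      rw [show ((4 : Int) ^ j) = (((4 ^ j : Nat) : Nat) : Int) from by push_cast; ring]
      rw [pvFd _ _ (by positivity)]
      rw [show ((4 : Int)) = (((4 : Nat) : Nat) : Int) from by norm_num]
      rw [pvMd _ _ (by positivity)]
      rw [Int.toNat_natCast, Int.toNat_natCast]
      rw [PySem.List.pyGet?_natCast]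
      unfold pvS4
      rw [List.getD_eq_getElem?_getD]
    rw [hhead, ih]
    rw [show pvDig4 (j + 1) rn = pvS4 (rn / 4 ^ j % 4) :: pvDig4 j rn from rfl]
    simp

-- value of the B tail for a finished loop state (m, i)
theorem pvTail_val (m : Int) (i : Nat) (hi : 2 ≤ i) (hm : 0 ≤ m)
    (hlt : m < 3 * 4 ^ (i - 1)) :
    pvTailB (m, i) =
      pvF ((['1', '4', '9'] : List Char).getD (m.toNat / 4 ^ (i - 1)) ' ' :: pvDig4 (i - 1) m.toNat) := by
  unfold pvTailB
  simp only []
  have hcast : ((4 : Int) ^ (i - 1)) = (((4 ^ (i - 1) : Nat) : Nat) : Int) := by push_cast; ring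
  rw [hcast, pvFd _ _ hm, pvMd _ _ hm]
  have hq3 : m.toNat / 4 ^ (i - 1) < 3 := by
    rw [Nat.div_lt_iff_lt_mul (Nat.pow_pos (by norm_num))]
    omega
  rw [PySem.List.pyGet?_natCast]
  rw [show ((i : Int) - 2) = (((i - 1 : Nat) : Int) - 1) from by push_cast [Nat.cast_sub (by omega : 1 ≤ i)]; ring]
  rw [pvFoldB (i - 1) (m.toNat % 4 ^ (i - 1))]
  rw [pvDig4_mod (i - 1) (i - 1) m.toNat le_rfl]
  rw [pvF, PySem.Int.ofStr?_ofList]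
  rw [List.getD_eq_getElem?_getD]
  rfl

-- the kept element of A's length-i round at index m equals the same string
theorem pvKept_get (i : Nat) (hi : 2 ≤ i) (j : Nat) (hj : j < 3 * 4 ^ (i - 1)) :
    ((pvProdA i).filter (pvKeep i)).getD j [] =
      (['1', '4', '9'] : List Char).getD (j / 4 ^ (i - 1)) ' ' :: pvDig4 (i - 1) j := by
  rw [pvKept_big i hi]
  rw [List.getD_eq_getElem?_getD]
  rw [pvBlocks_get _ _ (4 ^ (i - 1)) (Nat.pow_pos (by norm_num)) (pvProdA_length (i - 1)) j
    (by simpa using hj)]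
  rw [pvProdA_get (i - 1) (j % 4 ^ (i - 1)) (Nat.mod_lt _ (Nat.pow_pos (by norm_num)))]
  rw [pvDig4_mod (i - 1) (i - 1) j le_rfl]
  rfl

-- A's outer loop against B's while-loop, in lockstep from any round i ≥ 2
theorem pvMain (fuelA : Nat) (fuelB : Nat) (m : Int) (i : Nat) (hi : 2 ≤ i) (hm : 0 ≤ m)
    (hA : m.toNat < fuelA) (hB : m.toNat < fuelB) :
    pvOuterA fuelA i m = pvTailB (pvWloopB fuelB m i) := by
  induction fuelA generalizing fuelB m i with
  | zero => omega
  | succ fA ih =>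
    obtain ⟨fB, rfl⟩ : ∃ fB, fuelB = fB + 1 := ⟨fuelB - 1, by omega⟩
    have hLpos : 0 < 4 ^ (i - 1) := Nat.pow_pos (by norm_num)
    have hlen : (((pvProdA i).filter (pvKeep i)).length : Int) = 3 * 4 ^ (i - 1) := by
      rw [pvKept_big_length i hi]; push_cast; ring
    rw [show pvOuterA (fA + 1) i m = (match pvInnerA i m (pvProdA i) with
      | .inl r => r
      | .inr n' => pvOuterA fA (i + 1) n') from rfl]
    rw [pvInnerA_eq i _ m hm, hlen]
    by_cases hcond : m < 3 * (4 : Int) ^ (i - 1)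
    · rw [if_pos (by exact_mod_cast hcond)]
      rw [show pvWloopB (fB + 1) m i = if 3 * 4 ^ (i - 1) ≤ m then
          pvWloopB fB (m - 3 * 4 ^ (i - 1)) (i + 1) else (m, i) from rfl]
      rw [if_neg (by omega)]
      rw [pvKept_get i hi m.toNat (by
        have := hcond
        have h4 : ((4 : Int) ^ (i - 1)) = ((4 ^ (i - 1) : Nat) : Int) := by push_cast; ring
        omega)]
      rw [pvTail_val m i hi hm (by exact_mod_cast hcond)]
    · rw [if_neg (by omega)]
      rw [show pvWloopB (fB + 1) m i = if 3 * 4 ^ (i - 1) ≤ m then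
          pvWloopB fB (m - 3 * 4 ^ (i - 1)) (i + 1) else (m, i) from rfl]
      rw [if_pos (by omega)]
      have hc4 : ((4 : Int) ^ (i - 1)) = ((4 ^ (i - 1) : Nat) : Int) := by push_cast; ring
      have hcN : (1 : Int) ≤ 3 * (4 : Int) ^ (i - 1) := by
        rw [hc4]; omega
      have h1 : pvOuterA fA (i + 1) (m - 3 * 4 ^ (i - 1)) =
          pvTailB (pvWloopB fB (m - 3 * 4 ^ (i - 1)) (i + 1)) := by
        apply ih _ _ _ (by omega) (by omega)
        · rw [hc4] at hcond ⊢
          omega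
        · rw [hc4] at hcond ⊢
          omega
      show pvOuterA fA (i + 1) (m - 3 * 4 ^ (i - 1)) = _
      exact h1

-- ===== VERDICT (by name: the statement is the Claim_ definition above) =====
theorem getNumber_spec : Claim_equal_getNumber := by
  intro n _ hpre
  have hn : (0 : Int) ≤ n := hpre
  unfold Spec_getNumber
  by_cases h4 : n < 4
  · have : n = 0 ∨ n = 1 ∨ n = 2 ∨ n = 3 := by omega
    rcases this with rfl | rfl | rfl | rfl <;> decide
  · show pvOuterA (n.toNat + 1) 1 n = getNumber_alt n
    rw [pvAlt_eq n h4]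
    rw [show pvOuterA (n.toNat + 1) 1 n = (match pvInnerA 1 n (pvProdA 1) with
      | .inl r => r
      | .inr n' => pvOuterA n.toNat 2 n') from rfl]
    rw [pvInnerA_eq 1 _ n hn, pvKept_one]
    rw [if_neg (by simp; omega)]
    rw [show ((([['0'], ['1'], ['4'], ['9']] : List (List Char))).length : Int) = 4 from rfl]
    exact pvMain n.toNat ((n - 4).toNat + 1) (n - 4) 2 (by omega) (by omega) (by omega) (by omega)
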